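-- pv_equiv track=rewrite | github.com/NickVernal/JetStyle-test-task | object_arranger.py | _get_inner_coordinates
-- ===== SOURCE A (Python) =====
-- class HomeObject:
--     """
--     Size constants for home object.
--     """
--     WIDTH = 350
--     EDGE = 196
--     HEIGHT = int((EDGE ** 2 - (WIDTH / 2) ** 2) ** 0.5) * 2
--     HALF_WIDTH = int(WIDTH / 2)
--     HALF_HEIGHT = int(HEIGHT / 2)
--
-- class BlockObject:
--     """
--     Size constants for block object.
--     Block contains 12 (or less) home objects.
--     """
--     WIDTH = HomeObject.WIDTH * 4
--     HEIGHT = HomeObject.HEIGHT * 4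
--     DY = HEIGHT + HomeObject.HALF_HEIGHT
--     DX = WIDTH + HomeObject.HALF_WIDTH
--     HALF_DX = int(DX / 2)
--     HALF_DY = int(DY / 2)
--     HOME_AMT = 12
--
-- def _get_inner_coordinates(x_start: int, y_start: int, to_build: int, even: bool):
--     """
--     Returns coordinates of all home objects in specific block.
--     :param x_start: x coordinate of block
--     :param y_start: y coordinate of block
--     :param to_build: amount of home objects in block
--     :param even: Block direction (even/odd)
--     :return: list of coordinates
--     """
--     def get_homes_coordinates(index, _sign, amount):
--         x = int(x_start + HomeObject.WIDTH * coefficient[0][index])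
--         y = int(y_start + HomeObject.HEIGHT * coefficient[1][index])
--
--         return [(x + _sign * i * HomeObject.HALF_WIDTH, y + i * HomeObject.HALF_HEIGHT)
--                 for i in range(amount)]
--
--     coefficient = [[[1.5, 2.25, 3], [-1.5, -0.75, 0]],
--                    [[1.5, 0.75, 0], [-1.5, -0.75, 0]]][int(even)]
--
--     result = []
--     sign = 1 if even else -1
--
--     for j in range(int(to_build / 4)):
--         result += get_homes_coordinates(j, sign, 4)
--     if to_build < BlockObject.HOME_AMT:
--         result += get_homes_coordinates(int(to_build / 4), sign, to_build % 4)
--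
--     return result
-- ===== SOURCE B (Python) =====
-- def _get_inner_coordinates(x_start: int, y_start: int, to_build: int, even: bool):
--     """Flat single pass: k-th home lives in group k//4 at offset k%4."""
--     x_coeff = (1.5, 0.75, 0) if even else (1.5, 2.25, 3)
--     y_coeff = (-1.5, -0.75, 0)
--     sign = 1 if even else -1
--     out = []
--     for k in range(min(to_build, 12)):
--         j, i = divmod(k, 4)
--         out.append((int(x_start + 350 * x_coeff[j]) + sign * i * 175,
--                     int(y_start + 176 * y_coeff[j]) + i * 88))
--     return out
-- ===== Notes on version B (the rewrite author's own statement) =====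
-- stated objective: simpler
-- what changed: Replaced the nested per-group loop plus trailing remainder branch with one flat pass for k in range(min(to_build,12)) that derives the group and offset as divmod(k,4), dropping the HOME_AMT guard and the inner helper.
-- outside the precondition, e.g. on _get_inner_coordinates(0, 0, -5, True): A returns [(0, 0), (175, 88), (350, 176)], B returns []
import Mathlib
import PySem

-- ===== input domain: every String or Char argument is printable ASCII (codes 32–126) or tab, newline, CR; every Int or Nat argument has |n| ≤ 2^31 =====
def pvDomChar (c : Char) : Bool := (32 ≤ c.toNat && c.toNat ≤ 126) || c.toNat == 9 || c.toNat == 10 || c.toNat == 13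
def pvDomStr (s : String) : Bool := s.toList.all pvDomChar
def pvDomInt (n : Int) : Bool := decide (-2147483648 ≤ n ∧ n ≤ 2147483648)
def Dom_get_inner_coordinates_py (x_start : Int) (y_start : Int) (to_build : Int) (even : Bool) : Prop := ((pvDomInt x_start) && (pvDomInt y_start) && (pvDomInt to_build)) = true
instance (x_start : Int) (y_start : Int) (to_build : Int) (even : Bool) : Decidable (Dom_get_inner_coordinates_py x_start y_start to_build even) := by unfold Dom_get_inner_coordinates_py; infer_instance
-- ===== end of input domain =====

-- ===== PORT A =====
-- B changes only the loop decomposition (one flat pass instead of groups + remainder); objective: simpler.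
-- All float products in A are exact halves of integers, so each `int(start + C*coeff)` is encoded exactly as
-- truncating division of the doubled integer: Int.tdiv (2*start + 2*C*coeff) 2 (Python int() truncates toward zero).
-- coefficient[0] / coefficient[1] tables, doubled: x: 2*350*coeff, y: 2*176*coeff (exact)
def pvCoeffX (even : Bool) : List Int := if even then [1050, 525, 0] else [1050, 1575, 2100]
def pvCoeffY : List Int := [-528, -264, 0]

-- inner helper get_homes_coordinates(index, _sign, amount); pyGetD is exact here: inside Pre_ the index is
-- always in range (out of range Python raises IndexError, excluded by Pre_)
def pvHomes (x_start : Int) (y_start : Int) (even : Bool) (index : Int) (sign : Int) (amount : Int) : List (Int × Int) :=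
  let x := Int.tdiv (2 * x_start + PySem.List.pyGetD (pvCoeffX even) index 0) 2
  let y := Int.tdiv (2 * y_start + PySem.List.pyGetD pvCoeffY index 0) 2
  (PySem.List.pyRange 0 amount 1).map (fun i => (x + sign * i * 175, y + i * 88))

def get_inner_coordinates_py (x_start : Int) (y_start : Int) (to_build : Int) (even : Bool) : List (Int × Int) :=
  let sign : Int := if even then 1 else -1
  -- int(to_build / 4) is float true division then int(): exact truncating division here
  let result := (PySem.List.pyRange 0 (PySem.Int.truncdiv to_build 4) 1).foldl
    (fun acc j => acc ++ pvHomes x_start y_start even j sign 4) []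
  if to_build < 12 then
    result ++ pvHomes x_start y_start even (PySem.Int.truncdiv to_build 4) sign (PySem.Int.mod to_build 4)
  else result

-- ===== PORT B =====
def get_inner_coordinates_py_alt (x_start : Int) (y_start : Int) (to_build : Int) (even : Bool) : List (Int × Int) :=
  let cx : List Int := if even then [1050, 525, 0] else [1050, 1575, 2100]  -- 2*350*x_coeff (exact)
  let cy : List Int := [-528, -264, 0]                                      -- 2*176*y_coeff (exact)
  let sign : Int := if even then 1 else -1
  (PySem.List.pyRange 0 (min to_build 12) 1).map (fun k =>
    let j := PySem.Int.floordiv k 4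
    let i := PySem.Int.mod k 4
    (Int.tdiv (2 * x_start + PySem.List.pyGetD cx j 0) 2 + sign * i * 175,
     Int.tdiv (2 * y_start + PySem.List.pyGetD cy j 0) 2 + i * 88))

-- ===== PRECONDITION & SPEC =====
-- Pre_ excludes negative to_build, where a count makes no sense and A's non-empty results are an artefact of
-- negative-index wraparound into the coefficient tables (B returns []), and |to_build| >= 16, where A raises IndexError.
def Pre_get_inner_coordinates_py (x_start : Int) (y_start : Int) (to_build : Int) (even : Bool) : Prop :=
  0 ≤ to_build ∧ to_build < 16
instance (x_start : Int) (y_start : Int) (to_build : Int) (even : Bool) : Decidable (Pre_get_inner_coordinates_py x_start y_start to_build even) := by unfold Pre_get_inner_coordinates_py; infer_instance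
def pvWitness_get_inner_coordinates_py : Int × Int × Int × Bool := (0, 0, 7, true)

def Spec_get_inner_coordinates_py (x_start : Int) (y_start : Int) (to_build : Int) (even : Bool) (out : List (Int × Int)) : Prop := out = get_inner_coordinates_py_alt x_start y_start to_build even
instance (x_start : Int) (y_start : Int) (to_build : Int) (even : Bool) (out : List (Int × Int)) : Decidable (Spec_get_inner_coordinates_py x_start y_start to_build even out) := by unfold Spec_get_inner_coordinates_py; infer_instance

-- ===== CLAIM (what is proved, stated in full; the proofs are below) =====
def Claim_equal_get_inner_coordinates_py : Prop := ∀ (x_start : Int) (y_start : Int) (to_build : Int) (even : Bool), Dom_get_inner_coordinates_py x_start y_start to_build even → Pre_get_inner_coordinates_py x_start y_start to_build even → Spec_get_inner_coordinates_py x_start y_start to_build even (get_inner_coordinates_py x_start y_start to_build even)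
-- ===== LEMMAS AND PROOFS =====

-- ===== VERDICT (by name: the statement is the Claim_ definition above) =====
theorem get_inner_coordinates_py_spec : Claim_equal_get_inner_coordinates_py := by
  intro x_start y_start to_build even _ hpre
  obtain ⟨h0, h16⟩ := hpre
  unfold Spec_get_inner_coordinates_py
  interval_cases to_build <;> cases even <;> rfl
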